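-- pv_equiv track=rewrite | github.com/ssutee/naist-parser | naist_parser/ko_adapter.py | create_offset_list
-- ===== SOURCE A (Python) =====
-- def create_offset_list(surface):
--     """ Returns list of tuple (offset, length) of each word in surface form.
--     """
--     offset_list = []
--     offset = 0
--     for word in surface:
--         length = len(word)
--         offset_list.append([offset, length])
--         offset += length
--     return offset_list
-- ===== SOURCE B (Python) =====
-- def create_offset_list(surface):
--     """ Returns list of [offset, length] of each word in surface form,
--     built back-to-front: start from the total length and subtract. """
--     total = sum(len(w) for w in surface)
--     out = []
--     for word in reversed(surface):
--         total -= len(word)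
--         out.append([total, len(word)])
--     out.reverse()
--     return out
-- ===== Notes on version B (the rewrite author's own statement) =====
-- stated objective: alternative
-- what changed: B replaces the forward running-offset accumulator with a suffix-sum construction: it computes the total length once, walks the words in reverse subtracting each length to obtain offsets, and reverses the built list.
import Mathlib
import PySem

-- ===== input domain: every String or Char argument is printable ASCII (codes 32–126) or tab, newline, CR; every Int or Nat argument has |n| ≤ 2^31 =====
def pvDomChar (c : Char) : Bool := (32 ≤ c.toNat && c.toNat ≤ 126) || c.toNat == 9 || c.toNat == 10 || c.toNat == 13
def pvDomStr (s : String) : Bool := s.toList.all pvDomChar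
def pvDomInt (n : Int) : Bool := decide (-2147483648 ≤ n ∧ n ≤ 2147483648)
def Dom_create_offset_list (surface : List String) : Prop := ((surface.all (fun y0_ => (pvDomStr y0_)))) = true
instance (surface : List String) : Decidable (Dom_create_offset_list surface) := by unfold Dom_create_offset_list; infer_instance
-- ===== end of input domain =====

-- B builds the same [offset, length] pairs back-to-front from the total length instead of a forward running offset (alternative decomposition, same cost).

-- ===== PORT A =====
-- forward pass: append [offset, length] and advance the running offset
def create_offset_list (surface : List String) : List (List Int) :=
  (surface.foldl
    (fun (st : List (List Int) × Int) word =>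
      let length : Int := PySem.Str.len word
      (st.1 ++ [[st.2, length]], st.2 + length))
    ([], 0)).1

-- ===== PORT B =====
-- total = sum of lengths; walk reversed(surface), subtracting each length; reverse the result
def create_offset_list_alt (surface : List String) : List (List Int) :=
  let total : Int := surface.foldl (fun s w => s + PySem.Str.len w) 0
  let st := surface.reverse.foldl
    (fun (st : Int × List (List Int)) word =>
      (st.1 - PySem.Str.len word, st.2 ++ [[st.1 - PySem.Str.len word, PySem.Str.len word]]))
    (total, [])
  st.2.reverse

-- ===== PRECONDITION & SPEC =====
def Spec_create_offset_list (surface : List String) (out : List (List Int)) : Prop := out = create_offset_list_alt surface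
instance (surface : List String) (out : List (List Int)) : Decidable (Spec_create_offset_list surface out) := by unfold Spec_create_offset_list; infer_instance

-- ===== CLAIM (what is proved, stated in full; the proofs are below) =====
def Claim_equal_create_offset_list : Prop := ∀ (surface : List String), Dom_create_offset_list surface → Spec_create_offset_list surface (create_offset_list surface)

-- ===== LEMMAS AND PROOFS =====

-- reference recursion: the pairs produced from a starting offset
def pvGo (l : List String) (off : Int) : List (List Int) :=
  match l with
  | [] => []
  | w :: ws => [off, PySem.Str.len w] :: pvGo ws (off + PySem.Str.len w)

def pvSumLen : List String → Int
  | [] => 0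
  | w :: ws => PySem.Str.len w + pvSumLen ws

theorem pvSumLen_append (a b : List String) : pvSumLen (a ++ b) = pvSumLen a + pvSumLen b := by
  induction a with
  | nil => simp [pvSumLen]
  | cons w ws ih => simp [pvSumLen, ih]; ring

theorem pvSumLen_reverse (l : List String) : pvSumLen l.reverse = pvSumLen l := by
  induction l with
  | nil => rfl
  | cons w ws ih => simp [List.reverse_cons, pvSumLen_append, pvSumLen, ih]; ring

theorem pvSum_fold (l : List String) (c : Int) :
    l.foldl (fun s w => s + PySem.Str.len w) c = c + pvSumLen l := by
  induction l generalizing c with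
  | nil => simp [pvSumLen]
  | cons w ws ih =>
    simp only [List.foldl]
    rw [ih]
    simp [pvSumLen]; ring

theorem pvA_fold (l : List String) (acc : List (List Int)) (off : Int) :
    (l.foldl
      (fun (st : List (List Int) × Int) word =>
        let length : Int := PySem.Str.len word
        (st.1 ++ [[st.2, length]], st.2 + length))
      (acc, off)).1 = acc ++ pvGo l off := by
  induction l generalizing acc off with
  | nil => simp [pvGo]
  | cons w ws ih =>
    simp only [List.foldl]
    rw [ih]
    simp [pvGo]

theorem pvGo_append (l : List String) (w : String) (s : Int) :
    pvGo (l ++ [w]) s = pvGo l s ++ [[s + pvSumLen l, PySem.Str.len w]] := by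
  induction l generalizing s with
  | nil => simp [pvGo, pvSumLen]
  | cons x xs ih =>
    simp [pvGo, pvSumLen, ih]
    ring_nf

theorem pvB_fold (l : List String) (t : Int) (out : List (List Int)) :
    (l.foldl
      (fun (st : Int × List (List Int)) word =>
        (st.1 - PySem.Str.len word, st.2 ++ [[st.1 - PySem.Str.len word, PySem.Str.len word]]))
      (t, out)).2
    = out ++ (pvGo l.reverse (t - pvSumLen l)).reverse := by
  induction l generalizing t out with
  | nil => simp [pvGo, pvSumLen]
  | cons w ws ih =>
    simp only [List.foldl]
    rw [ih]
    rw [List.reverse_cons, pvGo_append, pvSumLen_reverse]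
    have h1 : t - pvSumLen (w :: ws) = t - PySem.Str.len w - pvSumLen ws := by
      simp [pvSumLen]; ring
    rw [h1]
    have h2 : t - PySem.Str.len w - pvSumLen ws + pvSumLen ws = t - PySem.Str.len w := by ring
    rw [h2]
    simp

-- ===== VERDICT (by name: the statement is the Claim_ definition above) =====
theorem create_offset_list_spec : Claim_equal_create_offset_list := by
  intro surface _
  show create_offset_list surface = create_offset_list_alt surface
  simp only [create_offset_list, create_offset_list_alt]
  rw [pvA_fold, pvSum_fold, pvB_fold]
  rw [List.reverse_reverse, pvSumLen_reverse]
  simp
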